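-- pv_equiv track=rewrite | github.com/rolandbernard/thesis-axiom-weakening | scripts/notes-to-tex.py | indentText
-- ===== SOURCE A (Python) =====
-- def indentText(text: str, level: int, skip_first=False):
--     indent = '    ' * level
--     lines = []
--     for i, line in enumerate(text.split('\n')):
--         if (not skip_first or i != 0) and line:
--             lines.append(indent + line)
--         else:
--             lines.append(line)
--     return '\n'.join(lines)
-- ===== SOURCE B (Python) =====
-- import re
--
-- def indentText(text: str, level: int, skip_first=False):
--     indent = '    ' * level
--     result = re.sub(r'(?<=\n)(?=.)', indent, text)
--     if not skip_first and text and text[0] != '\n':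
--         result = indent + result
--     return result
-- ===== Notes on version B (the rewrite author's own statement) =====
-- stated objective: idiomatic
-- what changed: Replaced A's split-into-lines / enumerate / per-line loop / join pipeline by a single left-to-right regex substitution that inserts the indent after every newline followed by a non-newline character, plus one prepend for the first line.
import Mathlib
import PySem

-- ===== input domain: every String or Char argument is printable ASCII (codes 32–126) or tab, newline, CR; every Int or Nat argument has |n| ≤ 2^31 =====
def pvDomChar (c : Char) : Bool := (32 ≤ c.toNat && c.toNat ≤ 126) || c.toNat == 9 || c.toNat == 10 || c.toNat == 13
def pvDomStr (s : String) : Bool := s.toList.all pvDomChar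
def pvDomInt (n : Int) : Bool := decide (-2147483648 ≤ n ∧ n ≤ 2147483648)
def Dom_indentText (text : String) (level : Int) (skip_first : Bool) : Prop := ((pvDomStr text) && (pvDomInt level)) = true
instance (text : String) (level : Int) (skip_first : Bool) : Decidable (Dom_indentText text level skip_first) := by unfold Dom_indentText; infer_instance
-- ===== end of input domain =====

-- B replaces A's split/enumerate/loop/join by a single left-to-right regex-style scan that
-- inserts the indent after each newline followed by a non-newline character (objective: idiomatic).

-- ===== PORT A =====
def indentText (text : String) (level : Int) (skip_first : Bool) : String :=
  let indent := PySem.List.pyRepeat "    ".toList level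
  let lines := (PySem.List.enumerate (PySem.Chars.splitOn text.toList ['\n'])).foldl
      (fun acc p =>
        acc ++ [if (!skip_first || p.1 != 0) && !p.2.isEmpty then indent ++ p.2 else p.2]) []
  String.mk (PySem.Chars.join ['\n'] lines)

-- ===== PORT B =====
-- hand port of re.sub(r'(?<=\n)(?=.)', indent, text) (no DOTALL, so '.' never matches '\n'):
-- exact, because that zero-width pattern matches precisely the positions right after a '\n'
-- whose next character exists and is not '\n', and re.sub inserts `ind` at each of them.
def indentScan (ind : List Char) : List Char → List Char
  | [] => []
  | c :: rest =>
    if c = '\n' then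
      match rest with
      | [] => ['\n']
      | c' :: _ => if c' ≠ '\n' then '\n' :: (ind ++ indentScan ind rest)
                   else '\n' :: indentScan ind rest
    else c :: indentScan ind rest

def indentText_alt (text : String) (level : Int) (skip_first : Bool) : String :=
  let indent := PySem.List.pyRepeat "    ".toList level
  let result := indentScan indent text.toList
  let result :=
    if !skip_first && (match text.toList with | [] => false | c :: _ => c ≠ '\n') then
      indent ++ result
    else result
  String.mk result

-- ===== PRECONDITION & SPEC =====
def Spec_indentText (text : String) (level : Int) (skip_first : Bool) (out : String) : Prop := out = indentText_alt text level skip_first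
instance (text : String) (level : Int) (skip_first : Bool) (out : String) : Decidable (Spec_indentText text level skip_first out) := by unfold Spec_indentText; infer_instance

-- ===== CLAIM (what is proved, stated in full; the proofs are below) =====
def Claim_equal_indentText : Prop := ∀ (text : String) (level : Int) (skip_first : Bool), Dom_indentText text level skip_first → Spec_indentText text level skip_first (indentText text level skip_first)

-- ===== LEMMAS AND PROOFS =====

-- structural reformulation of Python's split('\n')
def splitNL : List Char → List (List Char)
  | [] => [[]]
  | c :: r =>
    if c = '\n' then [] :: splitNL r
    else (c :: (splitNL r).headI) :: (splitNL r).tail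

theorem cons_headI_tail {α : Type} [Inhabited α] {l : List α} (h : l ≠ []) :
    l.headI :: l.tail = l := by
  cases l with
  | nil => exact absurd rfl h
  | cons a t => rfl

theorem splitNL_ne_nil (cs : List Char) : splitNL cs ≠ [] := by
  cases cs with
  | nil => simp [splitNL]
  | cons c r => simp only [splitNL]; split <;> simp

theorem splitOn_go_nl (cs : List Char) :
    ∀ (fuel : Nat) (cur : List Char) (acc : List (List Char)), cs.length ≤ fuel →
      PySem.Chars.splitOn.go ['\n'] fuel cs cur acc =
        acc.reverse ++ (cur.reverse ++ (splitNL cs).headI) :: (splitNL cs).tail := by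
  induction cs with
  | nil =>
    intro fuel cur acc _
    cases fuel <;> simp [PySem.Chars.splitOn.go, splitNL]
  | cons c rest ih =>
    intro fuel cur acc hf
    cases fuel with
    | zero => simp at hf
    | succ f =>
      by_cases hc : c = '\n'
      · subst hc
        simp only [PySem.Chars.splitOn.go]
        have hp : List.isPrefixOf ['\n'] ('\n' :: rest) = true := by
          simp [List.isPrefixOf]
        rw [hp]
        simp only [if_true, List.length_cons, List.length_nil, Nat.zero_add, List.drop_succ_cons, List.drop_zero]
        rw [ih f [] (cur.reverse :: acc) (by simpa using hf)]
        simp [splitNL, cons_headI_tail (splitNL_ne_nil rest)]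
      · simp only [PySem.Chars.splitOn.go]
        have hp : List.isPrefixOf ['\n'] (c :: rest) = false := by
          simp [List.isPrefixOf]; exact fun h => hc h.symm
        rw [hp]
        simp only [Bool.false_eq_true, if_false]
        rw [ih f (c :: cur) acc (by simpa using hf)]
        simp [splitNL, hc]

theorem splitOn_nl (cs : List Char) : PySem.Chars.splitOn cs ['\n'] = splitNL cs := by
  unfold PySem.Chars.splitOn
  rw [splitOn_go_nl cs (cs.length + 1) [] [] (by omega)]
  simp [cons_headI_tail (splitNL_ne_nil cs)]

def tailRender (ind : List Char) (ls : List (List Char)) : List Char :=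
  (ls.map (fun l => '\n' :: (if l.isEmpty then l else ind ++ l))).flatten

theorem scan_eq (ind : List Char) (cs : List Char) :
    indentScan ind cs = (splitNL cs).headI ++ tailRender ind (splitNL cs).tail := by
  induction cs with
  | nil => simp [indentScan, splitNL, tailRender]
  | cons c rest ih =>
    by_cases hc : c = '\n'
    · subst hc
      cases rest with
      | nil => simp [indentScan, splitNL, tailRender]
      | cons c' r =>
        have hsp : splitNL ('\n' :: c' :: r) = [] :: splitNL (c' :: r) := by
          simp [splitNL]
        by_cases hc' : c' = '\n'
        · subst hc'
          have hscan : indentScan ind ('\n' :: '\n' :: r) =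
              '\n' :: indentScan ind ('\n' :: r) := by
            simp [indentScan]
          have h0 : (splitNL ('\n' :: r)).headI = [] := by simp [splitNL]
          rw [hscan, ih, hsp]
          conv_rhs => rw [← cons_headI_tail (splitNL_ne_nil ('\n' :: r))]
          simp [tailRender, h0]
        · have hscan : indentScan ind ('\n' :: c' :: r) =
              '\n' :: (ind ++ indentScan ind (c' :: r)) := by
            simp [indentScan, hc']
          have hne : (splitNL (c' :: r)).headI.isEmpty = false := by
            simp [splitNL, hc']
          rw [hscan, ih, hsp]
          conv_rhs => rw [← cons_headI_tail (splitNL_ne_nil (c' :: r))]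
          simp only [List.headI_cons, List.tail_cons, List.nil_append, tailRender,
            List.map_cons, List.flatten_cons]
          simp at hne
          simp [hne]
    · have hscan : indentScan ind (c :: rest) = c :: indentScan ind rest := by
        simp [indentScan, hc]
      rw [hscan, ih]
      simp [splitNL, hc, tailRender]

theorem join_nl (a : List Char) (ls : List (List Char)) :
    PySem.Chars.join ['\n'] (a :: ls) = a ++ (ls.map (fun l => '\n' :: l)).flatten := by
  induction ls generalizing a with
  | nil => simp [PySem.Chars.join_singleton]
  | cons b t ih =>
    rw [PySem.Chars.join_cons_cons, ih]
    simp

theorem map_enum_tail (f : Int × List Char → List Char) (g : List Char → List Char)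
    (hfg : ∀ (i : Int) (l : List Char), i ≠ 0 → f (i, l) = g l)
    (ls : List (List Char)) (s : Int) (hs : 1 ≤ s) :
    (PySem.List.enumerate ls s).map f = ls.map g := by
  induction ls generalizing s with
  | nil => simp [PySem.List.enumerate_nil]
  | cons l t ih =>
    rw [PySem.List.enumerate_cons]
    simp only [List.map_cons]
    rw [hfg s l (by omega), ih (s + 1) (by omega)]

theorem indentText_eq_alt (text : String) (level : Int) (skip_first : Bool) :
    indentText text level skip_first = indentText_alt text level skip_first := by
  unfold indentText indentText_alt
  dsimp only
  set ind := PySem.List.pyRepeat "    ".toList level with hind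
  set cs := text.toList with hcs
  rw [splitOn_nl]
  have hL := cons_headI_tail (splitNL_ne_nil cs)
  rw [PySem.List.foldl_append_singleton_eq_map, ← hL, PySem.List.enumerate_cons]
  simp only [List.map_cons, List.nil_append]
  simp only [zero_add]
  rw [map_enum_tail _ (fun l => if !l.isEmpty then ind ++ l else l)
        (by intro i l hi; simp [hi]) _ 1 le_rfl]
  rw [join_nl, scan_eq]
  have ht : ((((splitNL cs).tail).map (fun l => if !l.isEmpty then ind ++ l else l)).map
      (fun l => '\n' :: l)).flatten = tailRender ind (splitNL cs).tail := by
    simp only [tailRender, List.map_map]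
    congr 1
    exact List.map_congr_left (fun (l : List Char) _ => by by_cases h : l.isEmpty <;> simp only [List.isEmpty_iff] at h <;> simp [h])
  rw [ht]
  have hcond : (match cs with | [] => false | c :: _ => decide (c ≠ '\n')) =
      !(splitNL cs).headI.isEmpty := by
    cases hc : cs with
    | nil => simp [splitNL]
    | cons c r => by_cases h : c = '\n' <;> simp [splitNL, h]
  rw [hcond]
  by_cases h1 : skip_first <;> by_cases h2 : (splitNL cs).headI.isEmpty <;>
    simp [h1, h2]

-- ===== VERDICT (by name: the statement is the Claim_ definition above) =====
theorem indentText_spec : Claim_equal_indentText := by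
  intro text level skip_first _
  unfold Spec_indentText
  exact indentText_eq_alt text level skip_first
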